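-- pv_equiv track=rewrite | github.com/maxnussbaum/MazeStuffGit | 2016-11-15_13-56-48_gameStuff.py | startEndPoints
-- ===== SOURCE A (Python) =====
-- def startEndPoints(mazz):
--     for i in range (len(mazz)):
--         for j in range (len(mazz[i])):
--             if mazz[i][j] == 6:
--                 startx = i
--                 starty = j
--             elif mazz[i][j] == 7:
--                 endx = i
--                 endy = j
--     return startx, starty, endx, endy
-- ===== SOURCE B (Python) =====
-- def startEndPoints(mazz):
--     # Searches backwards (last row-major occurrence = first hit from the end),
--     # stopping as soon as each marker is found.
--     def findLast(val):
--         for i in range(len(mazz) - 1, -1, -1):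
--             row = mazz[i]
--             for j in range(len(row) - 1, -1, -1):
--                 if row[j] == val:
--                     return i, j
--         raise ValueError("marker %d not found" % val)
--
--     startx, starty = findLast(6)
--     endx, endy = findLast(7)
--     return startx, starty, endx, endy
-- ===== Notes on version B (the rewrite author's own statement) =====
-- stated objective: alternative
-- what changed: Replaces the exhaustive forward scan keeping the last assignment with two backward searches (rows and cells traversed in reverse) that return at the first hit, so each marker search can stop early.
import Mathlib
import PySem

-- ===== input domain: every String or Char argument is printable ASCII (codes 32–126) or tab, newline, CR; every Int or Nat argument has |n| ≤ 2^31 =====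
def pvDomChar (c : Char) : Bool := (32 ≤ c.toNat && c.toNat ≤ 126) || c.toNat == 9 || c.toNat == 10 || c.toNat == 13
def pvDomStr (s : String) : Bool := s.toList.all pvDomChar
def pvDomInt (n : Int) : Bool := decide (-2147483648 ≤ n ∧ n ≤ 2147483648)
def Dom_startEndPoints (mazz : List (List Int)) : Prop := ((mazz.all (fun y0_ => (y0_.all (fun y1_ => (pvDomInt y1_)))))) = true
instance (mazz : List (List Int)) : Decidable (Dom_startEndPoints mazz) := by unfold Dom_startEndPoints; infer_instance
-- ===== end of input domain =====

-- B replaces the single exhaustive forward scan (last assignment wins) with two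
-- backward early-exit searches, one per marker; same results on grids containing both markers.


-- ===== PORT A =====
-- the two if-branches of A's inner loop, acting on the (start, end) option pair
def rowStepA (i : Nat) (st : Option (Int × Int) × Option (Int × Int)) (p : Int × Nat) :
    Option (Int × Int) × Option (Int × Int) :=
  if p.1 = 6 then (some ((i : Int), (p.2 : Int)), st.2)
  else if p.1 = 7 then (st.1, some ((i : Int), (p.2 : Int)))
  else st

def startEndPoints (mazz : List (List Int)) : Int × Int × Int × Int :=
  let st := mazz.zipIdx.foldl (fun st ri => ri.1.zipIdx.foldl (rowStepA ri.2) st) (none, none)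
  match st with
  | (some (sx, sy), some (ex, ey)) => (sx, sy, ex, ey)
  | _ => (0, 0, 0, 0)  -- Python raises UnboundLocalError here; excluded by Pre_

-- ===== PORT B =====
-- backward search: first hit scanning rows (and cells within a row) in reverse
def findLastAlt (mazz : List (List Int)) (v : Int) : Option (Int × Int) :=
  mazz.zipIdx.reverse.findSome? (fun ri =>
    ri.1.zipIdx.reverse.findSome? (fun p =>
      if p.1 = v then some ((ri.2 : Int), (p.2 : Int)) else none))

def startEndPoints_alt (mazz : List (List Int)) : Int × Int × Int × Int :=
  -- Python B raises ValueError when a marker is absent; excluded by Pre_, default (0,0) here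
  let s := (findLastAlt mazz 6).getD (0, 0)
  let e := (findLastAlt mazz 7).getD (0, 0)
  (s.1, s.2, e.1, e.2)

-- ===== PRECONDITION & SPEC =====
-- Pre_ excludes grids missing a 6 or a 7: A raises UnboundLocalError there (no value is returned).
def Pre_startEndPoints (mazz : List (List Int)) : Prop :=
  (∃ r ∈ mazz, (6 : Int) ∈ r) ∧ (∃ r ∈ mazz, (7 : Int) ∈ r)
instance (mazz : List (List Int)) : Decidable (Pre_startEndPoints mazz) := by
  unfold Pre_startEndPoints; infer_instance

def pvWitness_startEndPoints : List (List Int) := [[0, 6], [7, 1]]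

def Spec_startEndPoints (mazz : List (List Int)) (out : Int × Int × Int × Int) : Prop := out = startEndPoints_alt mazz
instance (mazz : List (List Int)) (out : Int × Int × Int × Int) : Decidable (Spec_startEndPoints mazz out) := by unfold Spec_startEndPoints; infer_instance

-- ===== CLAIM (what is proved, stated in full; the proofs are below) =====
def Claim_equal_startEndPoints : Prop := ∀ (mazz : List (List Int)), Dom_startEndPoints mazz → Pre_startEndPoints mazz → Spec_startEndPoints mazz (startEndPoints mazz)

-- ===== LEMMAS AND PROOFS =====

-- a left fold that overwrites its accumulator with each hit equals the first hit scanning in reverse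
theorem foldl_or_eq_rev_findSome? {α β : Type} (g : α → Option β) :
    ∀ (l : List α) (acc : Option β),
      l.foldl (fun a x => (g x).or a) acc = (l.reverse.findSome? g).or acc := by
  intro l
  induction l with
  | nil => intro acc; simp
  | cons x xs ih =>
      intro acc
      simp [List.foldl_cons, ih, List.findSome?_append]
      cases h : xs.reverse.findSome? g <;> cases hg : g x <;> simp [Option.or]

-- the value-v overwrite update, written in `.or` form
theorem upd_or (v : Int) (i : Nat) (a : Option (Int × Int)) (p : Int × Nat) :
    (if p.1 = v then some ((i : Int), (p.2 : Int)) else a)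
      = (if p.1 = v then some ((i : Int), (p.2 : Int)) else none).or a := by
  split <;> simp [Option.or]

-- proof-side helper: A's nested fold specialised to one marker value
def lastA (v : Int) (mazz : List (List Int)) : Option (Int × Int) :=
  mazz.zipIdx.foldl
    (fun a ri => ri.1.zipIdx.foldl
      (fun a p => if p.1 = v then some ((ri.2 : Int), (p.2 : Int)) else a) a) none

-- A's combined pair fold computes (lastA 6, lastA 7): the two components never interact
theorem row_pair (i : Nat) :
    ∀ (l : List (Int × Nat)) (st : Option (Int × Int) × Option (Int × Int)),
      l.foldl (rowStepA i) st
        = (l.foldl (fun a p => if p.1 = 6 then some ((i : Int), (p.2 : Int)) else a) st.1,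
           l.foldl (fun a p => if p.1 = 7 then some ((i : Int), (p.2 : Int)) else a) st.2) := by
  intro l
  induction l with
  | nil => intro st; simp
  | cons p ps ih =>
      intro st
      simp only [List.foldl_cons, ih]
      congr 1 <;> · unfold rowStepA; split_ifs with h1 h2 <;> simp_all
theorem outer_pair :
    ∀ (l : List (List Int × Nat)) (st : Option (Int × Int) × Option (Int × Int)),
      l.foldl (fun st ri => ri.1.zipIdx.foldl (rowStepA ri.2) st) st
        = (l.foldl (fun a ri => ri.1.zipIdx.foldl
              (fun a p => if p.1 = 6 then some ((ri.2 : Int), (p.2 : Int)) else a) a) st.1,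
           l.foldl (fun a ri => ri.1.zipIdx.foldl
              (fun a p => if p.1 = 7 then some ((ri.2 : Int), (p.2 : Int)) else a) a) st.2) := by
  intro l
  induction l with
  | nil => intro st; simp
  | cons ri rs ih =>
      intro st
      simp only [List.foldl_cons]
      rw [ih, row_pair]

-- the inner fold of lastA in `.or` form
theorem inner_or (v : Int) (i : Nat) (l : List (Int × Nat)) (a : Option (Int × Int)) :
    l.foldl (fun a p => if p.1 = v then some ((i : Int), (p.2 : Int)) else a) a
      = (l.reverse.findSome? (fun p => if p.1 = v then some ((i : Int), (p.2 : Int)) else none)).or a := by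
  rw [show (fun (a : Option (Int × Int)) (p : Int × Nat) =>
        if p.1 = v then some ((i : Int), (p.2 : Int)) else a)
      = (fun a p => (if p.1 = v then some ((i : Int), (p.2 : Int)) else none).or a) from
      funext fun a => funext fun p => upd_or v i a p]
  exact foldl_or_eq_rev_findSome? _ l a

-- A's per-marker fold equals B's backward search
theorem lastA_eq_findLastAlt (v : Int) (mazz : List (List Int)) :
    lastA v mazz = findLastAlt mazz v := by
  unfold lastA findLastAlt
  rw [show (fun (a : Option (Int × Int)) (ri : List Int × Nat) =>
        ri.1.zipIdx.foldl (fun a p => if p.1 = v then some ((ri.2 : Int), (p.2 : Int)) else a) a)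
      = (fun a ri => (ri.1.zipIdx.reverse.findSome?
            (fun p => if p.1 = v then some ((ri.2 : Int), (p.2 : Int)) else none)).or a) from
      funext fun a => funext fun ri => inner_or v ri.2 ri.1.zipIdx a]
  rw [foldl_or_eq_rev_findSome?]
  simp

-- a marker present in the grid is found by the backward search
theorem findLastAlt_isSome (v : Int) (mazz : List (List Int))
    (h : ∃ r ∈ mazz, v ∈ r) : (findLastAlt mazz v).isSome = true := by
  rcases h with ⟨r, hr, hv⟩
  rw [Option.isSome_iff_ne_none]
  intro hn
  unfold findLastAlt at hn
  rw [List.findSome?_eq_none_iff] at hn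
  obtain ⟨i, hi, hig⟩ := List.getElem_of_mem hr
  have hmem : (r, i) ∈ mazz.zipIdx.reverse := by
    rw [List.mem_reverse, List.mk_mem_zipIdx_iff_getElem?]
    simp [List.getElem?_eq_getElem hi, hig]
  have h1 := hn _ hmem
  rw [List.findSome?_eq_none_iff] at h1
  obtain ⟨j, hj, hjg⟩ := List.getElem_of_mem hv
  have hmem2 : (v, j) ∈ r.zipIdx.reverse := by
    rw [List.mem_reverse, List.mk_mem_zipIdx_iff_getElem?]
    simp [List.getElem?_eq_getElem hj, hjg]
  have h2 := h1 _ hmem2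
  simp at h2

-- ===== VERDICT (by name: the statement is the Claim_ definition above) =====
theorem startEndPoints_spec : Claim_equal_startEndPoints := by
  intro mazz _ hpre
  have hs6 := findLastAlt_isSome 6 mazz hpre.1
  have hs7 := findLastAlt_isSome 7 mazz hpre.2
  unfold Spec_startEndPoints startEndPoints startEndPoints_alt
  have h6 := lastA_eq_findLastAlt 6 mazz
  have h7 := lastA_eq_findLastAlt 7 mazz
  unfold lastA at h6 h7
  simp only [outer_pair, h6, h7]
  rcases h6' : findLastAlt mazz 6 with _ | ⟨a, b⟩ <;>
    rcases h7' : findLastAlt mazz 7 with _ | ⟨c, d⟩ <;>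
      simp_all
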